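-- pv_equiv track=rewrite | github.com/haoxiang-xu/miso | src/miso/workspace/pins.py | _normalize_content_text
-- ===== SOURCE A (Python) =====
-- def _normalize_content_text(value: str) -> str:
--     text = value.replace("\r\n", "\n").replace("\r", "\n")
--     normalized_lines = [line.rstrip() for line in text.split("\n")]
--     while normalized_lines and not normalized_lines[0].strip():
--         normalized_lines.pop(0)
--     while normalized_lines and not normalized_lines[-1].strip():
--         normalized_lines.pop()
--     return "\n".join(normalized_lines)
-- ===== SOURCE B (Python) =====
-- def _normalize_content_text(value: str) -> str:
--     text = value.replace("\r\n", "\n").replace("\r", "\n")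
--     joined = "\n".join(line.rstrip() for line in text.split("\n"))
--     return joined.strip("\n")
-- ===== Notes on version B (the rewrite author's own statement) =====
-- stated objective: simpler
-- what changed: The two while-pop loops trimming blank lines off the front and back of the line list are replaced by joining first and then stripping newline characters off both ends of the joined string.
import Mathlib
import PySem

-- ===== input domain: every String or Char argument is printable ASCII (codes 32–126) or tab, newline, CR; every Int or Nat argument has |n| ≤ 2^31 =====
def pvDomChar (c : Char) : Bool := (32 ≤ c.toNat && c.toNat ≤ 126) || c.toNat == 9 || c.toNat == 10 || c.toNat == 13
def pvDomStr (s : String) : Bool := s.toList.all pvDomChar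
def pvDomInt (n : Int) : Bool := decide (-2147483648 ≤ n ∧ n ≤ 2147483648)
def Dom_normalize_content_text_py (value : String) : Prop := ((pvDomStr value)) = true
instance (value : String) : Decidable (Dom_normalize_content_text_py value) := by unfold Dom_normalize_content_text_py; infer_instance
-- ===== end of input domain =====

-- B replaces A's two while-pop loops (trimming blank lines off the list) by one strip of the
-- newline characters off both ends of the joined string; objective: simpler.

-- ===== PORT A =====
-- while normalized_lines and not normalized_lines[0].strip(): normalized_lines.pop(0)
def pvDropLead (ls : List String) : List String :=
  match ls with
  | [] => []
  | l :: rest => if PySem.Str.strip l = "" then pvDropLead rest else l :: rest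

-- while normalized_lines and not normalized_lines[-1].strip(): normalized_lines.pop()
def pvDropTrail (ls : List String) : List String :=
  if h : ls = [] then []
  else if PySem.Str.strip (ls.getLast h) = "" then pvDropTrail ls.dropLast else ls
termination_by ls.length
decreasing_by simp [List.length_dropLast]; exact List.length_pos_iff.mpr h

def normalize_content_text_py (value : String) : String :=
  let text := PySem.Str.replace (PySem.Str.replace value "\r\n" "\n") "\r" "\n"
  let normalized_lines := (PySem.Chars.splitOn text.toList ['\n']).map
      (fun l => String.ofList (PySem.Chars.rstrip l))
  PySem.Str.join "\n" (pvDropTrail (pvDropLead normalized_lines))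

-- ===== PORT B =====
def normalize_content_text_py_alt (value : String) : String :=
  let text := PySem.Str.replace (PySem.Str.replace value "\r\n" "\n") "\r" "\n"
  let joined := PySem.Str.join "\n" ((PySem.Chars.splitOn text.toList ['\n']).map
      (fun l => String.ofList (PySem.Chars.rstrip l)))
  PySem.Str.stripChars joined "\n"

-- ===== PRECONDITION & SPEC =====
def Spec_normalize_content_text_py (value : String) (out : String) : Prop := out = normalize_content_text_py_alt value
instance (value : String) (out : String) : Decidable (Spec_normalize_content_text_py value out) := by unfold Spec_normalize_content_text_py; infer_instance

-- ===== CLAIM (what is proved, stated in full; the proofs are below) =====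
def Claim_equal_normalize_content_text_py : Prop := ∀ (value : String), Dom_normalize_content_text_py value → Spec_normalize_content_text_py value (normalize_content_text_py value)

-- ===== LEMMAS AND PROOFS =====

theorem pvDropWhile_congr {α : Type} {p q : α → Bool} {l : List α}
    (h : ∀ x ∈ l, p x = q x) : List.dropWhile p l = List.dropWhile q l := by
  induction l with
  | nil => rfl
  | cons a l ih =>
    have ha := h a (by simp)
    simp only [List.dropWhile_cons, ha]
    split
    · exact ih (fun x hx => h x (by simp [hx]))
    · rfl

theorem pvDropLead_eq (ls : List String) :
    pvDropLead ls = ls.dropWhile (fun l => decide (PySem.Str.strip l = "")) := by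
  induction ls with
  | nil => rfl
  | cons l rest ih =>
    by_cases h : PySem.Str.strip l = ""
    · rw [pvDropLead, if_pos h, List.dropWhile_cons, if_pos (by simp [h]), ih]
    · rw [pvDropLead, if_neg h, List.dropWhile_cons, if_neg (by simp [h])]

theorem pvDropTrail_eq (ls : List String) :
    pvDropTrail ls = (pvDropLead ls.reverse).reverse := by
  induction ls using pvDropTrail.induct with
  | case1 => simp [pvDropTrail, pvDropLead]
  | case2 ls h hlast ih =>
    have hrev : ls.reverse = ls.getLast h :: ls.dropLast.reverse := by
      conv_lhs => rw [← List.dropLast_append_getLast h]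
      simp
    rw [pvDropTrail, dif_neg h, if_pos hlast, ih, hrev, pvDropLead, if_pos hlast]
  | case3 ls h hlast =>
    have hrev : ls.reverse = ls.getLast h :: ls.dropLast.reverse := by
      conv_lhs => rw [← List.dropLast_append_getLast h]
      simp
    rw [pvDropTrail, dif_neg h, if_neg hlast, hrev, pvDropLead, if_neg hlast, ← hrev,
      List.reverse_reverse]

-- blank-line tests: rstrip/lstrip/strip are empty iff the string is all whitespace
theorem pvRstrip_eq_nil_iff (r : List Char) :
    PySem.Chars.rstrip r = [] ↔ ∀ c ∈ r, PySem.Chars.isspace c = true := by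
  simp [PySem.Chars.rstrip, List.dropWhile_eq_nil_iff]

theorem pvStrip_eq_nil_iff (r : List Char) :
    PySem.Chars.strip r = [] ↔ ∀ c ∈ r, PySem.Chars.isspace c = true := by
  rw [PySem.Chars.strip, pvRstrip_eq_nil_iff]
  constructor
  · intro h c hc
    simp only [PySem.Chars.lstrip] at h
    by_cases hm : c ∈ List.dropWhile PySem.Chars.isspace r
    · exact h c hm
    · have hc' : c ∈ List.takeWhile PySem.Chars.isspace r := by
        have hsplit := List.takeWhile_append_dropWhile (p := PySem.Chars.isspace) (l := r)
        rw [← hsplit] at hc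
        rcases List.mem_append.mp hc with h1 | h2
        · exact h1
        · exact absurd h2 hm
      exact List.mem_takeWhile_imp hc'
  · intro h c hc
    exact h c ((List.dropWhile_sublist _).subset hc)

theorem pvDropWhile_dropWhile {α : Type} (p : α → Bool) (l : List α) :
    List.dropWhile p (List.dropWhile p l) = List.dropWhile p l := by
  induction l with
  | nil => rfl
  | cons a l ih =>
    by_cases h : p a
    · simp [List.dropWhile_cons, h, ih]
    · simp [List.dropWhile_cons, h]

theorem pvRstrip_idem (r : List Char) :
    PySem.Chars.rstrip (PySem.Chars.rstrip r) = PySem.Chars.rstrip r := by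
  unfold PySem.Chars.rstrip
  rw [List.reverse_reverse, pvDropWhile_dropWhile]

theorem pvStrip_rstrip_eq_nil_iff (r : List Char) :
    PySem.Chars.strip (PySem.Chars.rstrip r) = [] ↔ PySem.Chars.rstrip r = [] := by
  constructor
  · intro h
    have := (pvStrip_eq_nil_iff _).mp h
    have := (pvRstrip_eq_nil_iff (PySem.Chars.rstrip r)).mpr this
    rwa [pvRstrip_idem] at this
  · intro h; rw [h]; rfl

-- the newline predicate used by stripChars with chars = "\n"
theorem pvPnl_eq (c : Char) : (['\n'] : List Char).contains c = decide (c = '\n') := by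
  simp [List.contains_eq_mem]

-- every piece produced by split("\n") is free of '\n'
theorem pvGo_no_sep : ∀ (fuel : Nat) (l cur : List Char) (acc : List (List Char)),
    (∀ x ∈ acc, ('\n' : Char) ∉ x) → ('\n' : Char) ∉ cur → l.length < fuel →
    ∀ x ∈ PySem.Chars.splitOn.go ['\n'] fuel l cur acc, ('\n' : Char) ∉ x := by
  intro fuel
  induction fuel with
  | zero => intro l cur acc _ _ hlt; omega
  | succ n ih =>
    intro l cur acc hacc hcur hlt x hx
    match l with
    | [] =>
      simp only [PySem.Chars.splitOn.go] at hx
      simp only [List.reverse_cons, List.mem_append, List.mem_reverse, List.mem_singleton] at hx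
      rcases hx with hx | hx
      · exact hacc x hx
      · subst hx; simpa using hcur
    | c :: rest =>
      simp only [PySem.Chars.splitOn.go] at hx
      by_cases hc : c = '\n'
      · have hpre : (['\n'] : List Char).isPrefixOf (c :: rest) = true := by
          simp [List.isPrefixOf, hc]
        rw [if_pos hpre] at hx
        refine ih (List.drop 1 (c :: rest)) [] (cur.reverse :: acc) ?_ (by simp) ?_ x hx
        · intro y hy
          rcases List.mem_cons.mp hy with hy | hy
          · subst hy; simpa using hcur
          · exact hacc y hy
        · simp at hlt ⊢; omega
      · have hpre : (['\n'] : List Char).isPrefixOf (c :: rest) = false := by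
          simp only [List.isPrefixOf, Bool.and_eq_false_iff]
          left
          exact beq_eq_false_iff_ne.mpr (Ne.symm hc)
        rw [hpre] at hx
        simp only [Bool.false_eq_true, if_false] at hx
        refine ih rest (c :: cur) acc hacc ?_ ?_ x hx
        · intro hmem
          rcases List.mem_cons.mp hmem with h1 | h1
          · exact hc h1.symm
          · exact hcur h1
        · simp at hlt ⊢; omega

theorem pvSplitOn_no_sep (s : List Char) :
    ∀ x ∈ PySem.Chars.splitOn s ['\n'], ('\n' : Char) ∉ x := by
  intro x hx
  exact pvGo_no_sep (s.length + 1) s [] [] (by simp) (by simp) (by omega) x hx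

theorem pvRstrip_no_sep (seg : List Char) (h : ('\n' : Char) ∉ seg) :
    ('\n' : Char) ∉ PySem.Chars.rstrip seg := by
  intro hmem
  apply h
  have : ('\n' : Char) ∈ (List.dropWhile PySem.Chars.isspace seg.reverse) := by
    simpa [PySem.Chars.rstrip] using hmem
  have := (List.dropWhile_sublist _).subset this
  simpa using this

-- join then dropWhile-newline = dropWhile-empty then join
theorem pvLstrip_join : ∀ (L : List (List Char)), (∀ l ∈ L, ('\n' : Char) ∉ l) →
    List.dropWhile (fun c => (['\n'] : List Char).contains c) (PySem.Chars.join ['\n'] L)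
      = PySem.Chars.join ['\n'] (L.dropWhile (fun l => decide (l = []))) := by
  intro L
  induction L with
  | nil => intro _; simp [PySem.Chars.join_nil]
  | cons l L ih =>
    intro h
    match L with
    | [] =>
      match l with
      | [] => simp [PySem.Chars.join_singleton, PySem.Chars.join_nil]
      | c :: r =>
        have hc : c ≠ '\n' := fun hc => h (c :: r) (by simp) (by simp [hc])
        simp [PySem.Chars.join_singleton, hc]
    | l' :: L' =>
      rw [PySem.Chars.join_cons_cons]
      match l with
      | [] =>
        have := ih (fun x hx => h x (by simp [hx]))
        simpa [List.dropWhile_cons, pvPnl_eq] using this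
      | c :: r =>
        have hc : c ≠ '\n' := fun hc => h (c :: r) (by simp) (by simp [hc])
        have hp : (['\n'] : List Char).contains c = false := by
          rw [pvPnl_eq]; simp [hc]
        rw [List.cons_append, List.cons_append, List.dropWhile_cons, hp]
        simp only [Bool.false_eq_true, if_false]
        simp [PySem.Chars.join_cons_cons]

theorem pvJoin_concat (X : List (List Char)) (a : List Char) :
    PySem.Chars.join ['\n'] (X ++ [a])
      = if X.isEmpty then a else PySem.Chars.join ['\n'] X ++ '\n' :: a := by
  induction X with
  | nil => simp [PySem.Chars.join_singleton]
  | cons x X ih =>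
    match X with
    | [] => simp [PySem.Chars.join_cons_cons, PySem.Chars.join_singleton]
    | y :: X' =>
      simp only [List.cons_append] at ih ⊢
      rw [PySem.Chars.join_cons_cons, ih]
      simp [PySem.Chars.join_cons_cons, List.append_assoc]

theorem pvRstrip_join : ∀ (L : List (List Char)), (∀ l ∈ L, ('\n' : Char) ∉ l) →
    List.rdropWhile (fun c => (['\n'] : List Char).contains c) (PySem.Chars.join ['\n'] L)
      = PySem.Chars.join ['\n'] (L.rdropWhile (fun l => decide (l = []))) := by
  intro L
  induction L using List.reverseRecOn with
  | nil => intro _; simp [PySem.Chars.join_nil, List.rdropWhile]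
  | append_singleton X a ih =>
    intro h
    have ha : ('\n' : Char) ∉ a := h a (by simp)
    rw [pvJoin_concat]
    by_cases hX : X.isEmpty
    · have hX' : X = [] := by simpa [List.isEmpty_iff] using hX
      subst hX'
      simp only [List.isEmpty_nil, if_true]
      match a with
      | [] => simp [List.rdropWhile, PySem.Chars.join_nil]
      | c :: r =>
        have hlast : ¬ (['\n'] : List Char).contains ((c :: r).getLast (by simp)) = true := by
          rw [pvPnl_eq]
          simp only [decide_eq_true_eq]
          intro hcontra
          exact ha (hcontra ▸ List.getLast_mem _)
        rw [List.rdropWhile_eq_self_iff.mpr (fun _ => hlast)]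
        simp [List.rdropWhile, PySem.Chars.join_singleton]
    · have hX' : X ≠ [] := by simpa [List.isEmpty_iff] using hX
      rw [if_neg hX]
      match a with
      | [] =>
        have step : List.rdropWhile (fun c => (['\n'] : List Char).contains c)
            (PySem.Chars.join ['\n'] X ++ ['\n'])
              = List.rdropWhile (fun c => (['\n'] : List Char).contains c)
                (PySem.Chars.join ['\n'] X) := by
          rw [List.rdropWhile_concat]
          simp [pvPnl_eq]
        rw [step, ih (fun x hx => h x (by simp [hx]))]
        congr 1
        rw [List.rdropWhile_concat]
        simp
      | c :: r =>
        have hne : PySem.Chars.join ['\n'] X ++ '\n' :: c :: r ≠ [] := by simp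
        have hlast : ((PySem.Chars.join ['\n'] X ++ '\n' :: c :: r).getLast hne)
            = (c :: r).getLast (by simp) := by
          rw [List.getLast_append]
          simp
        have hnotsep : ¬ (['\n'] : List Char).contains
            ((PySem.Chars.join ['\n'] X ++ '\n' :: c :: r).getLast hne) = true := by
          rw [hlast, pvPnl_eq]
          simp only [decide_eq_true_eq]
          intro hcontra
          exact ha (hcontra ▸ List.getLast_mem _)
        rw [List.rdropWhile_eq_self_iff.mpr (fun _ => hnotsep)]
        have : List.rdropWhile (fun l => decide (l = [])) (X ++ [c :: r]) = X ++ [c :: r] := by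
          rw [List.rdropWhile_concat]
          simp
        rw [this, pvJoin_concat, if_neg hX]

-- String-level dropWhile transported to char lists
theorem pvMap_toList_dropLead (ls : List String) :
    List.map String.toList (pvDropLead ls)
      = List.dropWhile (fun l => decide (PySem.Chars.strip l = []))
          (List.map String.toList ls) := by
  rw [pvDropLead_eq, List.dropWhile_map]
  congr 1
  apply pvDropWhile_congr
  intro x _
  have hiff : (PySem.Str.strip x = "") ↔ (PySem.Chars.strip x.toList = []) := by
    rw [← PySem.Str.toList_strip, String.toList_eq_nil_iff]
  simp [Function.comp, hiff]

theorem pvMap_toList_dropTrail (ls : List String) :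
    List.map String.toList (pvDropTrail ls)
      = List.rdropWhile (fun l => decide (PySem.Chars.strip l = []))
          (List.map String.toList ls) := by
  rw [pvDropTrail_eq, List.rdropWhile, List.map_reverse, pvMap_toList_dropLead,
    List.map_reverse]

-- ===== VERDICT (by name: the statement is the Claim_ definition above) =====
set_option maxHeartbeats 2000000 in
theorem normalize_content_text_py_spec : Claim_equal_normalize_content_text_py := by
  intro value _
  unfold Spec_normalize_content_text_py normalize_content_text_py normalize_content_text_py_alt
  set text := PySem.Str.replace (PySem.Str.replace value "\r\n" "\n") "\r" "\n" with htext
  set M : List (List Char) := (PySem.Chars.splitOn text.toList ['\n']).map PySem.Chars.rstrip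
    with hM
  have hMfree : ∀ l ∈ M, ('\n' : Char) ∉ l := by
    intro l hl
    rcases List.mem_map.mp hl with ⟨seg, hseg, rfl⟩
    exact pvRstrip_no_sep seg (pvSplitOn_no_sep _ seg hseg)
  have hMblank : ∀ l ∈ M, (decide (PySem.Chars.strip l = []) : Bool) = decide (l = []) := by
    intro l hl
    rcases List.mem_map.mp hl with ⟨seg, hseg, rfl⟩
    simp [pvStrip_rstrip_eq_nil_iff]
  have hlines : List.map String.toList ((PySem.Chars.splitOn text.toList ['\n']).map
      (fun l => String.ofList (PySem.Chars.rstrip l))) = M := by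
    simp [hM, Function.comp]
  apply String.toList_inj.mp
  rw [PySem.Str.toList_join, PySem.Str.toList_stripChars, PySem.Str.toList_join]
  rw [hlines]
  have hq := pvMap_toList_dropTrail (pvDropLead ((PySem.Chars.splitOn text.toList ['\n']).map
      (fun l => String.ofList (PySem.Chars.rstrip l))))
  rw [hq, pvMap_toList_dropLead, hlines]
  -- normalise the separator and the stripChars body
  have hsep : ("\n" : String).toList = ['\n'] := rfl
  rw [hsep]
  have hstrip : PySem.Chars.stripChars (PySem.Chars.join ['\n'] M) ['\n']
      = List.rdropWhile (fun c => (['\n'] : List Char).contains c)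
          (List.dropWhile (fun c => (['\n'] : List Char).contains c)
            (PySem.Chars.join ['\n'] M)) := by
    simp [PySem.Chars.stripChars, List.rdropWhile]
  rw [hstrip, pvLstrip_join M hMfree]
  have hsubset : ∀ l ∈ List.dropWhile (fun l => decide (l = [])) M, ('\n' : Char) ∉ l :=
    fun l hl => hMfree l ((List.dropWhile_sublist _).subset hl)
  rw [pvRstrip_join _ hsubset]
  -- finally replace the blank-line test by the emptiness test on both trims
  have h1 : List.dropWhile (fun l => decide (PySem.Chars.strip l = [])) M
      = List.dropWhile (fun l => decide (l = [])) M := pvDropWhile_congr hMblank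
  rw [h1]
  have h2 : List.rdropWhile (fun l => decide (PySem.Chars.strip l = []))
        (List.dropWhile (fun l => decide (l = [])) M)
      = List.rdropWhile (fun l => decide (l = []))
        (List.dropWhile (fun l => decide (l = [])) M) := by
    unfold List.rdropWhile
    exact congrArg List.reverse (pvDropWhile_congr (fun x hx => hMblank x
      ((List.dropWhile_sublist _).subset (List.mem_reverse.mp hx))))
  rw [h2]
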